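-- pv_equiv track=rewrite | github.com/anonymity1/reuse | Algorithm/simqueue/simqueue.py | sim_queue
-- ===== SOURCE A (Python) =====
-- def sim_queue(arrival_times, execution_times):
--     n = len(arrival_times)
--     queue_times = [0] * n
--     end_times = [0] * n
--     execution_order = []
--
--     current_time = 0
--
--     # 模拟每个任务的执行，
--     # 因为已知每个任务的到达时间和执行时间，和执行方式（FIFO）
--     # 不需要采用模拟每个时间戳的方式
--     for i in range(n):
--
--         # 计算该任务的排队时间
--         queue_times[i] = max(0, current_time - arrival_times[i])
--
--         # 将设备执行时间推进到当前任务的到达时间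
--         current_time = max(current_time, arrival_times[i])
--
--         # 执行当前任务，更新时间戳
--         end_time = current_time + execution_times[i]
--
--         end_times[i] = end_time
--
--         # 执行完成
--         execution_order.append(i)
--
--         # 更新当前时间
--         current_time = end_time
--
--     # 任务的到达时间、每个任务的实际开始时间、任务的结束时间，
--     execution_times_dict = {
--         i: {
--             'arrival_time': arrival_times[i],
--             'queue_time': queue_times[i],
--             'start_time': end_times[i] - execution_times[i],
--             'end_time': end_times[i]
--         } for i in range(n)
--     }
--
--     # 返回每个任务的排队时间、结束时间、执行顺序、以及每个任务的到达时间、实际开始时间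
--     return queue_times, end_times, execution_order, execution_times_dict
-- ===== SOURCE B (Python) =====
-- def sim_queue(arrival_times, execution_times):
--     n = len(arrival_times)
--     # Max-plus closed form instead of simulating the queue: with prefix sums
--     # P[i] = e_0 + ... + e_{i-1} and running maxima M[i] = max(0, a_0 - P[0], ..., a_{i-1} - P[i-1]),
--     # the machine is free after the first i tasks at time free[i] = P[i] + M[i],
--     # so end_times[i] = free[i+1] and the wait of task i is max(0, free[i] - a_i).
--     P = [0]
--     for i in range(n):
--         P.append(P[-1] + execution_times[i])
--     M = [0]
--     for a, p in zip(arrival_times, P):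
--         M.append(max(M[-1], a - p))
--     free = [p + m for p, m in zip(P, M)]
--     end_times = free[1:]
--     queue_times = [max(0, f - a) for a, f in zip(arrival_times, free)]
--     execution_order = list(range(n))
--     execution_times_dict = {
--         i: {
--             'arrival_time': arrival_times[i],
--             'queue_time': queue_times[i],
--             'start_time': end_times[i] - execution_times[i],
--             'end_time': end_times[i],
--         } for i in range(n)
--     }
--     return queue_times, end_times, execution_order, execution_times_dict
-- ===== Notes on version B (the rewrite author's own statement) =====
-- stated objective: alternative
-- what changed: Replaces A's stateful FIFO simulation (threaded current_time with max(current,arrival)+exec per step) by a max-plus closed form: prefix sums P of execution times and running maxima M of (arrival - P) are built as two independent tables, and free/end/queue times are read off as free[i] = P[i] + M[i].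
import Mathlib
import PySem

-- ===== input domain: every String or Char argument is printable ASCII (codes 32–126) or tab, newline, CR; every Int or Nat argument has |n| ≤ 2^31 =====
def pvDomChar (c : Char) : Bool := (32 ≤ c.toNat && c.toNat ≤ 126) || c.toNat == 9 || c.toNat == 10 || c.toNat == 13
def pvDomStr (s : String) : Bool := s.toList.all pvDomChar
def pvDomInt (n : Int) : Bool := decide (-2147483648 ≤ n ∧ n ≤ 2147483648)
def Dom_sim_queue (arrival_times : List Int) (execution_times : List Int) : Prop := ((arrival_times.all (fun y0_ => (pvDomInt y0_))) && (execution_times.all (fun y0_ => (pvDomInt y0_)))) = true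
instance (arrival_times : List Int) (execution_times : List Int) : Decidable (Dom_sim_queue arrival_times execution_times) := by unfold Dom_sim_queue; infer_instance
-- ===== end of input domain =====

-- B replaces A's stateful FIFO simulation by a max-plus closed form: prefix sums P of execution
-- times and running maxima M of (arrival - P), with free[i] = P[i] + M[i] (objective: alternative).


-- ===== PORT A =====
-- loop body of A's for-loop: state = (queue_times, end_times, execution_order, current_time);
-- pyGetD is exact here because Pre_ keeps every accessed index in range (Python raises outside Pre_)
def pvStepA (arrival_times execution_times : List Int)
    (st : List Int × List Int × List Int × Int) (i : Int) :
    List Int × List Int × List Int × Int :=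
  let a := PySem.List.pyGetD arrival_times i 0
  let qt := st.1.set i.toNat (max 0 (st.2.2.2 - a))
  let ct := max st.2.2.2 a
  let e := PySem.List.pyGetD execution_times i 0
  let endt := ct + e
  (qt, st.2.1.set i.toNat endt, st.2.2.1 ++ [i], endt)

def sim_queue (arrival_times : List Int) (execution_times : List Int) : List Int × List Int × List Int × (List (Int × List (String × Int))) :=
  let n : Int := (arrival_times.length : Int)
  let st := (PySem.List.pyRange 0 n).foldl (pvStepA arrival_times execution_times)
    (List.replicate arrival_times.length 0, List.replicate arrival_times.length 0, [], 0)
  (st.1, st.2.1, st.2.2.1,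
    (PySem.List.pyRange 0 n).map (fun i =>
      (i, [("arrival_time", PySem.List.pyGetD arrival_times i 0),
           ("queue_time", PySem.List.pyGetD st.1 i 0),
           ("start_time", PySem.List.pyGetD st.2.1 i 0 - PySem.List.pyGetD execution_times i 0),
           ("end_time", PySem.List.pyGetD st.2.1 i 0)])))

-- ===== PORT B =====
-- B's first loop: P = [0]; P.append(P[-1] + e) — the prefix-sum table of execution times.
-- Under Pre_ (n ≤ len execution_times) the loop reads exactly execution_times.take n.
def pvSums (p : Int) : List Int → List Int
  | [] => [p]
  | e :: t => p :: pvSums (p + e) t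

-- B's second loop: M = [0]; M.append(max(M[-1], a - p)) over zip(arrival_times, P).
def pvMaxes (m : Int) : List (Int × Int) → List Int
  | [] => [m]
  | (a, p) :: t => m :: pvMaxes (max m (a - p)) t

def sim_queue_alt (arrival_times : List Int) (execution_times : List Int) : List Int × List Int × List Int × (List (Int × List (String × Int))) :=
  let n : Int := (arrival_times.length : Int)
  let P := pvSums 0 (execution_times.take arrival_times.length)
  let M := pvMaxes 0 (arrival_times.zip P)
  let free := List.zipWith (· + ·) P M
  let ends := free.drop 1        -- free[1:] (exact: slice with nonnegative start)
  let qts := List.zipWith (fun a f => max 0 (f - a)) arrival_times free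
  (qts, ends, PySem.List.pyRange 0 n,
    (PySem.List.pyRange 0 n).map (fun i =>
      (i, [("arrival_time", PySem.List.pyGetD arrival_times i 0),
           ("queue_time", PySem.List.pyGetD qts i 0),
           ("start_time", PySem.List.pyGetD ends i 0 - PySem.List.pyGetD execution_times i 0),
           ("end_time", PySem.List.pyGetD ends i 0)])))

-- ===== PRECONDITION & SPEC =====
-- Pre_: A indexes execution_times[i] for every i < len(arrival_times); on shorter execution_times it raises IndexError.
def Pre_sim_queue (arrival_times : List Int) (execution_times : List Int) : Prop :=
  arrival_times.length ≤ execution_times.length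
instance (arrival_times : List Int) (execution_times : List Int) : Decidable (Pre_sim_queue arrival_times execution_times) := by unfold Pre_sim_queue; infer_instance
def pvWitness_sim_queue : List Int × List Int := ([2, 1, 5], [3, 4, 1])

-- instance search times out on the 4-component product type, so the DecidableEq term is assembled explicitly
def pvDecEqOut : DecidableEq (List Int × List Int × List Int × (List (Int × List (String × Int)))) :=
  fun a b =>
    @instDecidableEqProd _ _ (by infer_instance)
      (fun x y => @instDecidableEqProd _ _ (by infer_instance)
        (fun u v => @instDecidableEqProd _ _ (by infer_instance) (by infer_instance) u v) x y) a b

def Spec_sim_queue (arrival_times : List Int) (execution_times : List Int) (out : List Int × List Int × List Int × (List (Int × List (String × Int)))) : Prop := out = sim_queue_alt arrival_times execution_times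
instance (arrival_times : List Int) (execution_times : List Int) (out : List Int × List Int × List Int × (List (Int × List (String × Int)))) : Decidable (Spec_sim_queue arrival_times execution_times out) := by unfold Spec_sim_queue; exact pvDecEqOut _ _

-- ===== CLAIM (what is proved, stated in full; the proofs are below) =====
def Claim_equal_sim_queue : Prop := ∀ (arrival_times : List Int) (execution_times : List Int), Dom_sim_queue arrival_times execution_times → Pre_sim_queue arrival_times execution_times → Spec_sim_queue arrival_times execution_times (sim_queue arrival_times execution_times)

-- ===== LEMMAS AND PROOFS =====

-- proof-side characterisation of the FIFO end times: pvEndsB c l threads c = max(c, a) + e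
def pvEndsB (prev_end : Int) : List (Int × Int) → List Int
  | [] => []
  | (a, e) :: rest => (max prev_end a + e) :: pvEndsB (max prev_end a + e) rest

theorem pvGetD_cons_length (l : List Int) (x d : Int) : (x :: l).getD l.length d = l.getLastD x := by
  induction l generalizing x with
  | nil => simp
  | cons y ys ih => rw [List.length_cons, List.getD_cons_succ, ih y, List.getLastD_cons]

theorem pvEndsB_length (p : Int) (l : List (Int × Int)) : (pvEndsB p l).length = l.length := by
  induction l generalizing p with
  | nil => rfl
  | cons h t ih => simpa [pvEndsB] using ih _

theorem pvEndsB_snoc (l : List (Int × Int)) (p : Int) (x : Int × Int) :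
    pvEndsB p (l ++ [x]) = pvEndsB p l ++ [max ((pvEndsB p l).getLastD p) x.1 + x.2] := by
  induction l generalizing p with
  | nil => simp [pvEndsB]
  | cons h t ih =>
    obtain ⟨a, e⟩ := h
    rw [List.cons_append]
    simp only [pvEndsB]
    rw [ih, List.getLastD_cons, List.cons_append]

theorem pvZipWith_snoc (f : Int → Int → Int) (x : List Int) (a : Int) :
    ∀ (y : List Int) (b : Int), x.length < y.length →
      List.zipWith f (x ++ [a]) (y ++ [b]) = List.zipWith f x y ++ [f a (y.getD x.length 0)] := by
  induction x with
  | nil => intro y b h; match y with | c :: y' => simp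
  | cons u us ih =>
    intro y b h
    match y with
    | c :: y' =>
      simp only [List.cons_append, List.zipWith_cons_cons, List.length_cons] at *
      rw [ih y' b (by omega)]
      simp [List.getD]

theorem pvSet_mid (l : List Int) (m : Nat) (v : Int) :
    (l ++ List.replicate (m + 1) (0 : Int)).set l.length v = (l ++ [v]) ++ List.replicate m 0 := by
  simp [List.replicate_succ]

theorem pvLoop_inv (arr exec : List Int) (h : arr.length ≤ exec.length) :
    ∀ k : Nat, k ≤ arr.length →
    (PySem.List.pyRange 0 (k : Int)).foldl (pvStepA arr exec)
      (List.replicate arr.length 0, List.replicate arr.length 0, [], 0) =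
    (List.zipWith (fun a pe => max 0 (pe - a)) (arr.take k)
        (0 :: pvEndsB 0 ((arr.zip exec).take k)) ++ List.replicate (arr.length - k) 0,
     pvEndsB 0 ((arr.zip exec).take k) ++ List.replicate (arr.length - k) 0,
     PySem.List.pyRange 0 (k : Int),
     (pvEndsB 0 ((arr.zip exec).take k)).getLastD 0) := by
  intro k
  induction k with
  | zero =>
    intro _
    simp [pvEndsB]
  | succ k ih =>
    intro hk
    have hklt : k < arr.length := hk
    have hk2 : k < exec.length := by omega
    have hzk : k < (arr.zip exec).length := by rw [List.length_zip]; omega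
    have hrange : PySem.List.pyRange 0 (((k + 1 : Nat)) : Int)
        = PySem.List.pyRange 0 (k : Int) ++ [(k : Int)] := by
      have : (((k + 1 : Nat)) : Int) = (k : Int) + 1 := by push_cast; ring
      rw [this]; exact PySem.List.pyRange_one_succ_right (by exact_mod_cast Nat.zero_le k)
    have hEl : (pvEndsB 0 ((arr.zip exec).take k)).length = k := by
      rw [pvEndsB_length, List.length_take, List.length_zip]; omega
    have hQl : (List.zipWith (fun a pe => max 0 (pe - a)) (arr.take k)
        (0 :: pvEndsB 0 ((arr.zip exec).take k))).length = k := by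
      simp only [List.length_zipWith, List.length_take, List.length_cons, hEl]; omega
    have htakeA : arr.take (k + 1) = arr.take k ++ [arr[k]] := by
      rw [List.take_add_one, List.getElem?_eq_getElem hklt]; rfl
    have htakeZ : (arr.zip exec).take (k + 1)
        = (arr.zip exec).take k ++ [(arr[k], exec[k])] := by
      rw [List.take_add_one, List.getElem?_eq_getElem hzk, List.getElem_zip]; rfl
    have hget : PySem.List.pyGetD arr ((k : Nat) : Int) 0 = arr[k] := by
      rw [PySem.List.pyGetD_natCast, List.getD_eq_getElem?_getD, List.getElem?_eq_getElem hklt]; rfl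
    have hgete : PySem.List.pyGetD exec ((k : Nat) : Int) 0 = exec[k] := by
      rw [PySem.List.pyGetD_natCast, List.getD_eq_getElem?_getD, List.getElem?_eq_getElem hk2]; rfl
    have hrep : arr.length - k = (arr.length - (k + 1)) + 1 := by omega
    rw [hrange, List.foldl_append, ih (Nat.le_of_lt hklt)]
    simp only [List.foldl_cons, List.foldl_nil, pvStepA, hget, hgete, Int.toNat_natCast]
    rw [htakeZ, pvEndsB_snoc, List.getLastD_concat, htakeA]
    rw [hrep]
    have hsetE := pvSet_mid (pvEndsB 0 (List.take k (arr.zip exec))) (arr.length - (k + 1))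
      (max ((pvEndsB 0 (List.take k (arr.zip exec))).getLastD 0) arr[k] + exec[k])
    rw [hEl] at hsetE
    have hsetQ := pvSet_mid (List.zipWith (fun a pe => max 0 (pe - a)) (List.take k arr)
        (0 :: pvEndsB 0 (List.take k (arr.zip exec)))) (arr.length - (k + 1))
      (max 0 ((pvEndsB 0 (List.take k (arr.zip exec))).getLastD 0 - arr[k]))
    rw [hQl] at hsetQ
    rw [hsetQ, hsetE, ← List.cons_append,
        pvZipWith_snoc _ _ _ _ _ (by simp only [List.length_take, List.length_cons, hEl]; omega),
        List.length_take,
        show min k arr.length = (pvEndsB 0 (List.take k (arr.zip exec))).length from by omega,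
        pvGetD_cons_length]

-- zip with a truncated right list is the plain zip
theorem pvZipTake (a : List Int) : ∀ b : List Int, a.zip (b.take a.length) = a.zip b := by
  induction a with
  | nil => intro b; simp
  | cons x t ih =>
    intro b
    cases b with
    | nil => simp
    | cons y u => simp [List.zip_cons_cons, ih u]

-- the bridge: B's tables P and M recombine (pointwise sum) into (p+m) followed by the FIFO end times
theorem pvPM_ends : ∀ (l₁ l₂ : List Int) (p m : Int), l₁.length = l₂.length →
    List.zipWith (· + ·) (pvSums p l₂) (pvMaxes m (l₁.zip (pvSums p l₂)))
      = (p + m) :: pvEndsB (p + m) (l₁.zip l₂) := by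
  intro l₁
  induction l₁ with
  | nil =>
    intro l₂ p m h
    have : l₂ = [] := by cases l₂ <;> simp_all
    subst this
    simp [pvSums, pvMaxes, pvEndsB]
  | cons a t₁ ih =>
    intro l₂ p m h
    cases l₂ with
    | nil => simp at h
    | cons e t₂ =>
      simp only [List.length_cons, Nat.add_right_cancel_iff] at h
      simp only [pvSums, List.zip_cons_cons, pvMaxes, List.zipWith_cons_cons, pvEndsB]
      rw [ih t₂ (p + e) (max m (a - p)) h]
      have h1 : p + e + max m (a - p) = max (p + m) a + e := by
        rcases le_total m (a - p) with hc | hc <;> simp [hc] <;> omega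
      rw [h1]

-- ===== VERDICT (by name: the statement is the Claim_ definition above) =====
theorem sim_queue_spec : Claim_equal_sim_queue := by
  intro arr exec _ hpre
  have hle : arr.length ≤ exec.length := hpre
  unfold Spec_sim_queue sim_queue sim_queue_alt
  have hmain := pvLoop_inv arr exec hle arr.length le_rfl
  rw [List.take_length, List.take_of_length_le (by rw [List.length_zip]; omega)] at hmain
  simp only [Nat.sub_self, List.replicate_zero, List.append_nil] at hmain
  have hlen : arr.length = (exec.take arr.length).length := by
    rw [List.length_take]; omega
  have hfree : List.zipWith (· + ·) (pvSums 0 (exec.take arr.length))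
      (pvMaxes 0 (arr.zip (pvSums 0 (exec.take arr.length))))
      = (0 : Int) :: pvEndsB 0 (arr.zip exec) := by
    have := pvPM_ends arr (exec.take arr.length) 0 0 hlen
    rw [pvZipTake arr exec] at this
    simpa using this
  dsimp only
  rw [hmain, hfree]
  rfl
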